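-- pv_equiv track=rewrite | github.com/JonathanBeltranNeri/IA-P2 | Lógica/Lógica Proposicional/007_Backtracking.py | buscar_camino
-- ===== SOURCE A (Python) =====
-- grafo = {
--     "inicio": ["tren", "camion"],
--     "tren": ["estacion_tren"],
--     "camion": ["terminal_camion"],
--     "estacion_tren": ["destino"],
--     "terminal_camion": ["destino"],
--     "destino": []
-- }
--
-- def buscar_camino(estado_actual, objetivo, camino=[]):
--     camino = camino + [estado_actual]
--     if estado_actual == objetivo:
--         return camino
--     if estado_actual not in grafo:
--         return None
--     for siguiente in grafo[estado_actual]: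
--         if siguiente not in camino:
--             nuevo_camino = buscar_camino(siguiente, objetivo, camino)
--             if nuevo_camino:
--                 return nuevo_camino
--     return None
-- ===== SOURCE B (Python) =====
-- grafo = {
--     "inicio": ["tren", "camion"],
--     "tren": ["estacion_tren"],
--     "camion": ["terminal_camion"],
--     "estacion_tren": ["destino"],
--     "terminal_camion": ["destino"],
--     "destino": []
-- }
--
-- def buscar_camino(estado_actual, objetivo, camino=[]):
--     # iterative DFS with an explicit stack of (node, path-so-far) frames
--     stack = [(estado_actual, camino)]
--     while stack:
--         nodo, path = stack.pop()
--         nuevo_camino = path + [nodo]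
--         if nodo == objetivo:
--             return nuevo_camino
--         if nodo not in grafo:
--             continue
--         # push in reverse so the first neighbour is explored first
--         for siguiente in reversed(grafo[nodo]):
--             if siguiente not in nuevo_camino:
--                 stack.append((siguiente, nuevo_camino))
--     return None
-- ===== Notes on version B (the rewrite author's own statement) =====
-- stated objective: alternative
-- what changed: Recursive backtracking DFS replaced by an iterative DFS with an explicit stack of (node, path) frames, neighbours pushed in reverse so the first-found path is identical.
import Mathlib
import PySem

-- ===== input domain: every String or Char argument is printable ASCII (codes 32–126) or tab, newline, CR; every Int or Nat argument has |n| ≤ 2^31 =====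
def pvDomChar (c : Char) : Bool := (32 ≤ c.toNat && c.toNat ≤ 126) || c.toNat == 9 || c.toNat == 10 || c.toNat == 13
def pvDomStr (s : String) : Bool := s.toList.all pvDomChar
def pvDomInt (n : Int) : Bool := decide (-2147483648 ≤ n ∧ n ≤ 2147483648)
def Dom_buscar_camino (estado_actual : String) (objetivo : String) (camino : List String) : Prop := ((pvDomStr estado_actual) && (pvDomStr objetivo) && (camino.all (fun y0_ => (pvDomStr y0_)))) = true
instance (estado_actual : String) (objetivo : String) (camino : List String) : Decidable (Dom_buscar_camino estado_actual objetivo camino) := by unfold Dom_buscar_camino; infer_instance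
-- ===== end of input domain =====

-- B replaces A's recursive backtracking DFS by an iterative DFS over an explicit stack of
-- (node, path) frames; neighbours are pushed so the first neighbour is explored first,
-- hence the same path (or None) is returned.  Objective: alternative decomposition.

-- ===== PORT A =====

-- the module constant `grafo`
def pvGrafo : PySem.Dict String (List String) :=
  PySem.Dict.mk [("inicio", ["tren", "camion"]), ("tren", ["estacion_tren"]),
    ("camion", ["terminal_camion"]), ("estacion_tren", ["destino"]),
    ("terminal_camion", ["destino"]), ("destino", [])]

-- the six keys of `grafo`
def pvNodes : List String :=
  ["inicio", "tren", "camion", "estacion_tren", "terminal_camion", "destino"]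

-- termination measure: number of graph nodes not yet on the path
def pvMissing (camino : List String) : Nat :=
  (pvNodes.filter (fun k => decide (k ∉ camino))).length

-- lookup in `grafo` always yields a list of graph nodes, at most 6 of them
theorem pvGrafo_get?_spec (s : String) (l : List String)
    (h : PySem.Dict.get? pvGrafo s = some l) :
    (∀ c ∈ l, c ∈ pvNodes) ∧ l.length ≤ 6 := by
  simp only [pvGrafo, PySem.Dict.get?_mk_cons, beq_iff_eq] at h
  split_ifs at h
  · cases h; exact ⟨by decide, by decide⟩
  · cases h; exact ⟨by decide, by decide⟩
  · cases h; exact ⟨by decide, by decide⟩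
  · cases h; exact ⟨by decide, by decide⟩
  · cases h; exact ⟨by decide, by decide⟩
  · cases h; exact ⟨by decide, by decide⟩
  · simp [PySem.Dict.get?] at h

-- generic: filtering with a stronger predicate gives a shorter list
theorem pv_filter_le (L : List String) (p q : String → Bool) (himp : ∀ x, q x = true → p x = true) :
    (L.filter q).length ≤ (L.filter p).length := by
  induction L with
  | nil => simp
  | cons x xs ih =>
    simp only [List.filter_cons]
    by_cases hq : q x = true
    · simp [hq, himp x hq]; omega
    · simp only [hq, Bool.false_eq_true, if_false]
      by_cases hp : p x = true
      · simp [hp]; omega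
      · simp [hp]; omega

theorem pv_filter_lt (L : List String) (camino : List String) (c : String)
    (hcL : c ∈ L) (hc : c ∉ camino) :
    (L.filter (fun k => decide (k ∉ camino ++ [c]))).length
      < (L.filter (fun k => decide (k ∉ camino))).length := by
  have himp : ∀ x, (decide (x ∉ camino ++ [c])) = true → (decide (x ∉ camino)) = true := by
    intro x hx; simp at hx ⊢; exact fun h => (hx.1 h).elim
  induction L with
  | nil => simp at hcL
  | cons x xs ih =>
    simp only [List.filter_cons]
    rcases List.mem_cons.mp hcL with rfl | hx
    · have h1 : (decide (c ∉ camino ++ [c])) = false := by simp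
      have h2 : (decide (c ∉ camino)) = true := by simp [hc]
      simp only [h1, h2, Bool.false_eq_true, if_false, if_true, List.length_cons]
      exact Nat.lt_succ_of_le (pv_filter_le xs _ _ himp)
    · have := ih hx
      cases hqx : (decide (x ∉ camino ++ [c])) with
      | true => simp only [himp x hqx, if_true, List.length_cons]; omega
      | false =>
        simp only [Bool.false_eq_true, if_false]
        cases hpx : (decide (x ∉ camino)) with
        | true => simp only [if_true, List.length_cons]; omega
        | false => simp only [Bool.false_eq_true, if_false]; omega

theorem pvMissing_append_lt (camino : List String) (c : String)
    (hmem : c ∈ pvNodes) (hnot : c ∉ camino) :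
    pvMissing (camino ++ [c]) < pvMissing camino :=
  pv_filter_lt pvNodes camino c hmem hnot

-- Port of A.  The recursion is A's: add estado to camino, return it if it is the goal,
-- fail if estado is not a graph key, otherwise try the neighbours in order, recursing on
-- the ones not already on the path and returning the first truthy result.
-- pvA_loop carries an extra Prop argument (erased) used only to justify termination.
mutual
def pvA_buscar (estado objetivo : String) (camino : List String) : Option (List String) :=
  let camino2 := camino ++ [estado]
  if estado = objetivo then some camino2
  else
    match h : PySem.Dict.get? pvGrafo estado with
    | none => none
    | some vecinos => pvA_loop objetivo camino2 vecinos ((pvGrafo_get?_spec _ _ h).1) ((pvGrafo_get?_spec _ _ h).2)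
termination_by (pvMissing (camino ++ [estado]), 7)
decreasing_by
  exact Prod.Lex.right _ (by have := (pvGrafo_get?_spec _ _ h).2; omega)

def pvA_loop (objetivo : String) (camino : List String) (vecinos : List String)
    (hv : ∀ c ∈ vecinos, c ∈ pvNodes) (hl : vecinos.length ≤ 6) : Option (List String) :=
  match vecinos with
  | [] => none
  | s :: rest =>
    if hs : s ∈ camino then
      pvA_loop objetivo camino rest (fun c hc => hv c (List.mem_cons_of_mem _ hc)) (by simp at hl ⊢; omega)
    else
      match pvA_buscar s objetivo camino with
      | some p =>
        if p = [] then pvA_loop objetivo camino rest (fun c hc => hv c (List.mem_cons_of_mem _ hc)) (by simp at hl ⊢; omega)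
        else some p
      | none => pvA_loop objetivo camino rest (fun c hc => hv c (List.mem_cons_of_mem _ hc)) (by simp at hl ⊢; omega)
termination_by (pvMissing camino, vecinos.length)
decreasing_by
  all_goals first
    | exact Prod.Lex.left _ _ (pvMissing_append_lt camino s (hv s List.mem_cons_self) hs)
    | exact Prod.Lex.right _ (by simp)
end



-- ===== PORT B =====

def pvB_loop (objetivo : String) (stack : List (String × List String)) : Option (List String) :=
  match stack with
  | [] => none
  | (nodo, path) :: rest =>
    let nuevo := path ++ [nodo]
    if nodo = objetivo then some nuevo
    else
      match h : PySem.Dict.get? pvGrafo nodo with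
      | none => pvB_loop objetivo rest
      | some vecinos =>
          pvB_loop objetivo (((vecinos.filter (fun s => decide (s ∉ nuevo))).map (fun s => (s, nuevo))) ++ rest)
termination_by (stack.map (fun f => 7 ^ (pvMissing (f.2 ++ [f.1]) + 1))).sum
decreasing_by
  · simp only [List.map_cons, List.sum_cons]
    have : 1 ≤ 7 ^ (pvMissing (path ++ [nodo]) + 1) := Nat.one_le_pow _ _ (by omega)
    omega
  · simp only [List.map_cons, List.sum_cons, List.map_append, List.sum_append, List.map_map]
    have hspec := pvGrafo_get?_spec _ _ h
    set L := vecinos.filter (fun s => decide (s ∉ path ++ [nodo])) with hL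
    have hbound : ∀ x ∈ L.map ((fun f => 7 ^ (pvMissing (f.2 ++ [f.1]) + 1)) ∘ (fun s => (s, path ++ [nodo]))),
        x ≤ 7 ^ (pvMissing (path ++ [nodo])) := by
      intro x hx
      rcases List.mem_map.mp hx with ⟨c, hc, rfl⟩
      have hc1 : c ∈ vecinos := List.mem_of_mem_filter hc
      have hc2 : c ∉ path ++ [nodo] := by have := List.of_mem_filter hc; simpa using this
      have hlt := pvMissing_append_lt (path ++ [nodo]) c (hspec.1 c hc1) hc2
      simp only [Function.comp]
      exact Nat.pow_le_pow_right (by omega) (by omega)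
    have hsum := List.sum_le_card_nsmul _ _ hbound
    have hlen : (L.map ((fun f => 7 ^ (pvMissing (f.2 ++ [f.1]) + 1)) ∘ (fun s => (s, path ++ [nodo])))).length ≤ 6 := by
      simpa [hL] using le_trans (List.length_filter_le _ _) hspec.2
    have hpow : 6 * 7 ^ (pvMissing (path ++ [nodo])) < 7 ^ (pvMissing (path ++ [nodo]) + 1) := by
      rw [pow_succ]
      have : 1 ≤ 7 ^ (pvMissing (path ++ [nodo])) := Nat.one_le_pow _ _ (by omega)
      omega
    have h6 : (L.map ((fun f => 7 ^ (pvMissing (f.2 ++ [f.1]) + 1)) ∘ (fun s => (s, path ++ [nodo])))).length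
        * 7 ^ (pvMissing (path ++ [nodo])) ≤ 6 * 7 ^ (pvMissing (path ++ [nodo])) :=
      Nat.mul_le_mul_right _ hlen
    simp only [smul_eq_mul] at hsum
    omega

def buscar_camino (estado_actual : String) (objetivo : String) (camino : List String) : Option (List String) :=
  pvA_buscar estado_actual objetivo camino

def buscar_camino_alt (estado_actual : String) (objetivo : String) (camino : List String) : Option (List String) :=
  pvB_loop objetivo [(estado_actual, camino)]

-- ===== PRECONDITION & SPEC =====
def Spec_buscar_camino (estado_actual : String) (objetivo : String) (camino : List String) (out : Option (List String)) : Prop := out = buscar_camino_alt estado_actual objetivo camino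
instance (estado_actual : String) (objetivo : String) (camino : List String) (out : Option (List String)) : Decidable (Spec_buscar_camino estado_actual objetivo camino out) := by unfold Spec_buscar_camino; infer_instance

-- ===== CLAIM (what is proved, stated in full; the proofs are below) =====
def Claim_equal_buscar_camino : Prop := ∀ (estado_actual : String) (objetivo : String) (camino : List String), Dom_buscar_camino estado_actual objetivo camino → Spec_buscar_camino estado_actual objetivo camino (buscar_camino estado_actual objetivo camino)

-- ===== LEMMAS AND PROOFS =====

def pvOr (x : Option (List String)) (acc : Option (List String)) : Option (List String) :=
  match x with
  | some l => if l = [] then acc else some l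
  | none => acc

theorem pvA_loop_some_ne (objetivo : String) (camino : List String) (vecinos : List String)
    (hv : ∀ c ∈ vecinos, c ∈ pvNodes) (hl : vecinos.length ≤ 6) (l : List String)
    (h : pvA_loop objetivo camino vecinos hv hl = some l) : l ≠ [] := by
  induction vecinos with
  | nil => rw [pvA_loop.eq_def] at h; simp at h
  | cons s rest ih =>
    rw [pvA_loop.eq_def] at h
    simp only at h
    split_ifs at h with hs
    · exact ih _ _ h
    · revert h
      split
      · next p hp =>
        split_ifs with hpe
        · exact fun h => ih _ _ h
        · intro h; injection h with h; subst h; exact hpe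
      · exact fun h => ih _ _ h

theorem pvA_buscar_some_ne (estado objetivo : String) (camino : List String) (l : List String)
    (h : pvA_buscar estado objetivo camino = some l) : l ≠ [] := by
  rw [pvA_buscar.eq_def] at h
  simp only at h
  split_ifs at h with he
  · injection h with h; subst h; simp
  · revert h
    split
    · exact fun h => by simp at h
    · exact fun h => pvA_loop_some_ne _ _ _ _ _ _ h

theorem pvA_loop_eq_foldr (objetivo : String) (camino : List String) (vecinos : List String)
    (hv : ∀ c ∈ vecinos, c ∈ pvNodes) (hl : vecinos.length ≤ 6) (acc : Option (List String)) :
    (vecinos.filter (fun s => decide (s ∉ camino))).foldr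
      (fun c a => pvOr (pvA_buscar c objetivo camino) a) acc
    = pvOr (pvA_loop objetivo camino vecinos hv hl) acc := by
  induction vecinos with
  | nil => rw [pvA_loop.eq_def]; simp [pvOr]
  | cons s rest ih =>
    rw [pvA_loop.eq_def]
    simp only
    by_cases hs : s ∈ camino
    · have hd : (decide (s ∉ camino)) = false := by simp [hs]
      simp only [List.filter_cons, hd, Bool.false_eq_true, if_false, dif_pos hs]
      exact ih _ _
    · have hd : (decide (s ∉ camino)) = true := by simp [hs]
      simp only [List.filter_cons, hd, if_true, List.foldr_cons, dif_neg hs]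
      split
      · next p hp =>
        by_cases hpe : p = []
        · simp only [pvOr, hp, hpe, if_true]
          exact ih _ _
        · simp [pvOr, hp, hpe]
      · next hp =>
        simp only [pvOr, hp]
        exact ih _ _

theorem pvB_loop_eq_foldr (objetivo : String) (stack : List (String × List String)) :
    pvB_loop objetivo stack
    = stack.foldr (fun f a => pvOr (pvA_buscar f.1 objetivo f.2) a) none := by
  induction stack using pvB_loop.induct objetivo with
  | case1 => rw [pvB_loop.eq_def]; rfl
  | case2 path rest =>
    rw [pvB_loop.eq_def]
    simp only [if_true, List.foldr_cons]
    rw [pvA_buscar.eq_def]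
    simp only [if_true, pvOr]
    have hne : path ++ [objetivo] ≠ [] := by simp
    simp [hne]
  | case3 nodo path rest hobj h ih =>
    rw [pvB_loop.eq_def]
    simp only [hobj, if_false, List.foldr_cons]
    rw [pvA_buscar.eq_def]
    simp only [hobj, if_false]
    split
    · next h' => rw [ih]; simp [pvOr]
    · next vecinos h' => rw [h] at h'; cases h'
  | case4 nodo path rest nuevo hobj vecinos h ih =>
    rw [pvB_loop.eq_def]
    simp only [hobj, if_false, List.foldr_cons]
    split
    · next h' => rw [h] at h'; cases h'
    · next vecinos' h' =>
      rw [h] at h'; injection h' with h'; subst h'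
      rw [pvA_buscar.eq_def]
      simp only [hobj, if_false]
      split
      · next h'' => rw [h] at h''; cases h''
      · next vecinos'' h'' =>
        rw [h] at h''; injection h'' with h''; subst h''
        rw [ih, List.foldr_append, List.foldr_map, pvA_loop_eq_foldr]


-- ===== VERDICT (by name: the statement is the Claim_ definition above) =====
theorem buscar_camino_spec : Claim_equal_buscar_camino := by
  intro estado_actual objetivo camino _
  unfold Spec_buscar_camino buscar_camino buscar_camino_alt
  rw [pvB_loop_eq_foldr]
  simp only [List.foldr_cons, List.foldr_nil]
  cases h : pvA_buscar estado_actual objetivo camino with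
  | none => simp [pvOr]
  | some l =>
    have := pvA_buscar_some_ne _ _ _ _ h
    simp [pvOr, this]
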